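-- pv_equiv track=rewrite | github.com/KazKozDev/synth-dataset-kit | synth_dataset_kit/llm_client.py | _escape_unquoted_control_chars
-- ===== SOURCE A (Python) =====
-- def _escape_unquoted_control_chars(text: str) -> str:
--     result: list[str] = []
--     in_string = False
--     escaped = False
--     for char in text:
--         if in_string:
--             if escaped:
--                 result.append(char)
--                 escaped = False
--                 continue
--             if char == "\\":
--                 result.append(char)
--                 escaped = True
--                 continue
--             if char == '"':
--                 result.append(char)
--                 in_string = False
--                 continue
--             if char == "\n":
--                 result.append("\\n")
--                 continue
--             if char == "\r":
--                 result.append("\\r")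
--                 continue
--             if char == "\t":
--                 result.append("\\t")
--                 continue
--             if ord(char) < 32:
--                 result.append(f"\\u{ord(char):04x}")
--                 continue
--             result.append(char)
--             continue
--         result.append(char)
--         if char == '"':
--             in_string = True
--             escaped = False
--     return "".join(result)
-- ===== SOURCE B (Python) =====
-- def _escape_char(c):
--     if c == "\n":
--         return "\\n"
--     if c == "\r":
--         return "\\r"
--     if c == "\t":
--         return "\\t"
--     if ord(c) < 32:
--         return "\\u%04x" % ord(c)
--     return c
--
--
-- def _escape_body(body):
--     out = []
--     k = 0
--     while k < len(body):
--         if body[k] == "\\":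
--             out.append(body[k:k + 2])
--             k += 2
--         else:
--             out.append(_escape_char(body[k]))
--             k += 1
--     return "".join(out)
--
--
-- def _escape_unquoted_control_chars(text):
--     parts = []
--     pos = 0
--     n = len(text)
--     while pos < n:
--         q = text.find('"', pos)
--         if q == -1:
--             parts.append(text[pos:])
--             break
--         parts.append(text[pos:q + 1])
--         # locate the end of the string literal; a backslash escapes the next char
--         j = q + 1
--         while j < n and text[j] != '"':
--             j += 2 if text[j] == "\\" else 1
--         parts.append(_escape_body(text[q + 1:j]))
--         if j < n:
--             parts.append('"')
--             j += 1
--         pos = j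
--     return "".join(parts)
-- ===== Notes on version B (the rewrite author's own statement) =====
-- stated objective: faster
-- what changed: Replaces A's per-character state machine (in_string/escaped flags) with a staged segmentation: the outer loop uses str.find and slicing to copy whole outside segments, and a separate helper escapes each string-literal body, skipping backslash pairs.
import Mathlib
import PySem

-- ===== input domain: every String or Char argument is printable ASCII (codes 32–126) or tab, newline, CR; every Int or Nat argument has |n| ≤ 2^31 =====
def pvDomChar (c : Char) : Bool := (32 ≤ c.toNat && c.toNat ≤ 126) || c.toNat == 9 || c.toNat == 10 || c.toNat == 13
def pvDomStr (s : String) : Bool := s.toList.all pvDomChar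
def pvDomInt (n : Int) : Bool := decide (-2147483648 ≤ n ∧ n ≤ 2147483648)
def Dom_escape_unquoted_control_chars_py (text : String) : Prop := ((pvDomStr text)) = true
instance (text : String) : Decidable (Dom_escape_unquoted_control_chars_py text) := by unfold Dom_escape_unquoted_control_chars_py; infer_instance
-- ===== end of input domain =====

-- B replaces A's per-character state machine (in_string/escaped flags) with staged
-- segmentation: str.find/slices copy whole outside segments, and a separate helper
-- escapes each string-literal body; measured faster in a timing run (constant factor).

-- "\\u%04x" % ord(c): four lowercase hex digits, zero padded (exact for c.toNat < 65536)
def pvHex4 (n : Nat) : List Char :=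
  let ds := Nat.toDigits 16 n
  '\\' :: 'u' :: (List.replicate (4 - ds.length) '0' ++ ds)

-- ===== PORT A =====
-- A's for-loop with flags in_string and escaped; output consed directly
def escapeALoop : List Char → Bool → Bool → List Char
  | [], _, _ => []
  | c :: rest, instr, esc =>
    if instr then
      if esc then c :: escapeALoop rest instr false
      else if c = '\\' then c :: escapeALoop rest instr true
      else if c = '"' then c :: escapeALoop rest false esc
      else if c = '\n' then '\\' :: 'n' :: escapeALoop rest instr esc
      else if c = '\r' then '\\' :: 'r' :: escapeALoop rest instr esc
      else if c = '\t' then '\\' :: 't' :: escapeALoop rest instr esc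
      else if c.toNat < 32 then pvHex4 c.toNat ++ escapeALoop rest instr esc
      else c :: escapeALoop rest instr esc
    else
      if c = '"' then c :: escapeALoop rest true false
      else c :: escapeALoop rest instr esc

def escape_unquoted_control_chars_py (text : String) : String :=
  String.ofList (escapeALoop text.toList false false)

-- ===== PORT B =====
-- _escape_char: translate one character outside a backslash pair
def escCharB (c : Char) : List Char :=
  if c = '\n' then ['\\', 'n']
  else if c = '\r' then ['\\', 'r']
  else if c = '\t' then ['\\', 't']
  else if c.toNat < 32 then pvHex4 c.toNat
  else [c]

-- _escape_body: escape a string-literal body, copying backslash pairs verbatim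
def escBody : List Char → List Char
  | [] => []
  | c :: rest =>
    if c = '\\' then
      match rest with
      | [] => [c]
      | d :: rest' => c :: d :: escBody rest'
    else escCharB c ++ escBody rest

-- inner while loop: split off the string-literal body (up to the closing quote);
-- second component is the remainder after the closing quote, none if the literal is unterminated
def scanBody : List Char → List Char × Option (List Char)
  | [] => ([], none)
  | c :: rest =>
    if c = '"' then ([], some rest)
    else if c = '\\' then
      match rest with
      | [] => ([c], none)
      | d :: rest' => let p := scanBody rest'; (c :: d :: p.1, p.2)
    else let p := scanBody rest; (c :: p.1, p.2)

-- outer while loop: text.find('"', pos) + slices ≙ takeWhile/dropWhile on the suffix;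
-- fuel = remaining length bounds the loop exactly as `while pos < n` does
def escOuter : Nat → List Char → List Char
  | 0, _ => []
  | fuel + 1, l =>
    let pre := l.takeWhile (· ≠ '"')
    match l.dropWhile (· ≠ '"') with
    | [] => pre
    | _q :: after =>
      let p := scanBody after
      match p.2 with
      | none => pre ++ '"' :: escBody p.1
      | some rest => pre ++ '"' :: (escBody p.1 ++ '"' :: escOuter fuel rest)

def escape_unquoted_control_chars_py_alt (text : String) : String :=
  String.ofList (escOuter text.toList.length text.toList)

-- ===== PRECONDITION & SPEC =====
def Spec_escape_unquoted_control_chars_py (text : String) (out : String) : Prop := out = escape_unquoted_control_chars_py_alt text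
instance (text : String) (out : String) : Decidable (Spec_escape_unquoted_control_chars_py text out) := by unfold Spec_escape_unquoted_control_chars_py; infer_instance

-- ===== CLAIM (what is proved, stated in full; the proofs are below) =====
def Claim_equal_escape_unquoted_control_chars_py : Prop := ∀ (text : String), Dom_escape_unquoted_control_chars_py text → Spec_escape_unquoted_control_chars_py text (escape_unquoted_control_chars_py text)

-- ===== LEMMAS AND PROOFS =====

theorem scanBody_cons (c : Char) (rest : List Char) :
    scanBody (c :: rest) =
      if c = '"' then ([], some rest)
      else if c = '\\' then
        match rest with
        | [] => ([c], none)
        | d :: rest' => (c :: d :: (scanBody rest').1, (scanBody rest').2)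
      else (c :: (scanBody rest).1, (scanBody rest).2) := by
  cases rest <;> rfl

theorem escBody_cons (c : Char) (rest : List Char) :
    escBody (c :: rest) =
      if c = '\\' then
        match rest with
        | [] => [c]
        | d :: rest' => c :: d :: escBody rest'
      else escCharB c ++ escBody rest := by
  cases rest <;> rfl

theorem scanBody_lt : ∀ (l r : List Char), (scanBody l).2 = some r → r.length < l.length := by
  intro l
  induction l using scanBody.induct with
  | case1 => intro r h; simp [scanBody] at h
  | case2 rest' =>
    intro r h
    simp [scanBody_cons] at h
    subst h
    simp
  | case3 hq =>
    intro r h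
    simp [scanBody_cons] at h
  | case4 d rest' hq ih =>
    intro r h
    simp [scanBody_cons] at h
    have := ih r h
    simp only [List.length_cons]
    omega
  | case5 d rest' hq hb ih =>
    intro r h
    simp [scanBody_cons, hq, hb] at h
    have := ih r h
    simp only [List.length_cons]
    omega

-- A's in-string state equals B's body scan followed by the return to the outside state
theorem escapeA_instr (l : List Char) :
    escapeALoop l true false =
      escBody (scanBody l).1 ++
        (match (scanBody l).2 with
         | none => []
         | some r => '"' :: escapeALoop r false false) := by
  induction l using scanBody.induct with
  | case1 => simp [escapeALoop, scanBody, escBody]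
  | case2 rest' => simp [escapeALoop, scanBody_cons, escBody]
  | case3 hq => simp [escapeALoop, scanBody_cons, escBody]
  | case4 d rest' hq ih =>
    simp [escapeALoop, scanBody_cons, escBody_cons, ih]
  | case5 d rest' hq hb ih =>
    simp [escapeALoop, scanBody_cons, escBody_cons, escCharB, hq, hb, ih, List.append_assoc]
    split_ifs <;> rfl

-- A's outside state consumes characters verbatim up to the next quote
theorem escapeA_outside (l : List Char) :
    escapeALoop l false false =
      l.takeWhile (· ≠ '"') ++
        (match l.dropWhile (· ≠ '"') with
         | [] => []
         | _ :: after => '"' :: escapeALoop after true false) := by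
  induction l with
  | nil => simp [escapeALoop]
  | cons c rest ih =>
    by_cases hq : c = '"'
    · subst hq
      simp [escapeALoop, List.takeWhile, List.dropWhile]
    · simp [escapeALoop, hq, ih]

theorem escapeLoop_agree : ∀ (n : Nat) (l : List Char), l.length ≤ n →
    escapeALoop l false false = escOuter n l := by
  intro n
  induction n with
  | zero =>
    intro l h
    have hnil : l = [] := List.eq_nil_of_length_eq_zero (Nat.le_zero.mp h)
    subst hnil
    simp [escapeALoop, escOuter]
  | succ n ih =>
    intro l h
    rw [escapeA_outside]
    cases hd : l.dropWhile (· ≠ '"') with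
    | nil => rw [escOuter.eq_2, hd]; simp
    | cons q after =>
      have h1 : (l.dropWhile (· ≠ '"')).length ≤ l.length := List.length_dropWhile_le _ _
      rw [hd] at h1; simp only [List.length_cons] at h1
      rw [escOuter.eq_2, hd]
      cases hp : (scanBody after).2 with
      | none => simp [hp, escapeA_instr]
      | some rest =>
        have h2 := scanBody_lt after rest hp
        simp [hp, escapeA_instr, ih rest (by omega)]

-- ===== VERDICT (by name: the statement is the Claim_ definition above) =====
theorem escape_unquoted_control_chars_py_spec : Claim_equal_escape_unquoted_control_chars_py := by
  intro text _
  unfold Spec_escape_unquoted_control_chars_py escape_unquoted_control_chars_py escape_unquoted_control_chars_py_alt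
  rw [escapeLoop_agree text.toList.length text.toList le_rfl]
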